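-- pv_equiv track=rewrite | github.com/beep-42/SiteSeek | src/Database.py | _prepare_kmers_to_positions_dict
-- ===== SOURCE A (Python) =====
-- from collections import defaultdict, namedtuple
--
-- def _prepare_kmers_to_positions_dict(kmers_dict, sequence, k=3):
--
--     prepared = defaultdict(set)
--     for i in range(0, len(sequence) - k + 1):
--         slice = sequence[i:i + k]
--         if slice in kmers_dict:
--             prepared[slice].add(i + 1)
--             for one in kmers_dict[slice]:
--                 prepared[one].add(i+1)
--     return prepared
-- ===== SOURCE B (Python) =====
-- from collections import defaultdict
--
--
-- def _prepare_kmers_to_positions_dict(kmers_dict, sequence, k=3):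
--     # Pass 1: inverted index over the sequence -- each matched k-mer slice
--     # mapped to the ascending list of its (1-based) positions.
--     occ = {}
--     for i in range(len(sequence) - k + 1):
--         s = sequence[i:i + k]
--         if s in kmers_dict:
--             occ.setdefault(s, []).append(i + 1)
--     # Pass 2: k-mer-driven accumulation -- propagate each matched slice's
--     # whole position list at once to the slice and to its related k-mers.
--     acc = {}
--     for s, pos in occ.items():
--         acc.setdefault(s, []).extend(pos)
--         for one in kmers_dict[s]:
--             acc.setdefault(one, []).extend(pos)
--     prepared = defaultdict(set)
--     for key, positions in acc.items():
--         prepared[key] = set(sorted(positions))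
--     return prepared
-- ===== Notes on version B (the rewrite author's own statement) =====
-- stated objective: alternative
-- what changed: Replaces the position-driven scan that re-touches every related k-mer at each matching position by an inverted-index build (slice -> position list) followed by a k-mer-driven pass that propagates each matched slice's whole position list at once.
import Mathlib
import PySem

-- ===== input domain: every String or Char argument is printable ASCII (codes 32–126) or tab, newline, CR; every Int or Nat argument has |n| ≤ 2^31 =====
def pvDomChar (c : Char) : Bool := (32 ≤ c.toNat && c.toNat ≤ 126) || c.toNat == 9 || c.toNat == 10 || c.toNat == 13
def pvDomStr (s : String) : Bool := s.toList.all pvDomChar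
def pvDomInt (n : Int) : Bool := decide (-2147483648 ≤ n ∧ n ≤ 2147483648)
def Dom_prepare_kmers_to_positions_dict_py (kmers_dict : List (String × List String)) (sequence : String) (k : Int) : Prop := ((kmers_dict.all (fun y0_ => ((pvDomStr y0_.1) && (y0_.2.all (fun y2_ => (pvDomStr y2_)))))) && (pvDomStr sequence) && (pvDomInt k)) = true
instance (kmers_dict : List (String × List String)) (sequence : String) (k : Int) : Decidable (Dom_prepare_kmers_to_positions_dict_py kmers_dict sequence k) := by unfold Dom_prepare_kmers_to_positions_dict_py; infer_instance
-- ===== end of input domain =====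

-- B replaces A's position-driven scan (which re-touches every related k-mer at each matching
-- position) by an inverted index slice -> positions built in one pass, then a k-mer-driven pass
-- propagating each matched slice's whole position list at once; same return value (alternative).

-- ===== PORT A =====
def prepare_kmers_to_positions_dict_py (kmers_dict : List (String × List String)) (sequence : String) (k : Int) : List (String × List Int) :=
  let d := PySem.Dict.ofList kmers_dict
  let prepared : PySem.Dict String (List Int) :=
    (PySem.List.pyRange 0 (PySem.Str.len sequence - k + 1) 1).foldl
      (fun prepared i =>
        let slc := PySem.Str.slice sequence (some i) (some (i + k))
        if d.contains slc then
          (PySem.Dict.getD d slc []).foldl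
            (fun prepared one => prepared.modify one [] (fun s => PySem.Set.add s (i + 1)))
            (prepared.modify slc [] (fun s => PySem.Set.add s (i + 1)))
        else prepared)
      PySem.Dict.empty
  prepared.items

-- ===== PORT B =====
def prepare_kmers_to_positions_dict_py_alt (kmers_dict : List (String × List String)) (sequence : String) (k : Int) : List (String × List Int) :=
  let d := PySem.Dict.ofList kmers_dict
  let occ : PySem.Dict String (List Int) :=
    (PySem.List.pyRange 0 (PySem.Str.len sequence - k + 1) 1).foldl
      (fun occ i =>
        let s := PySem.Str.slice sequence (some i) (some (i + k))
        if d.contains s then occ.modify s [] (fun l => l ++ [i + 1]) else occ)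
      PySem.Dict.empty
  let acc : PySem.Dict String (List Int) :=
    occ.items.foldl
      (fun acc p =>
        (PySem.Dict.getD d p.1 []).foldl
          (fun acc one => acc.modify one [] (fun l => l ++ p.2))
          (acc.modify p.1 [] (fun l => l ++ p.2)))
      PySem.Dict.empty
  acc.items.map (fun p => (p.1, PySem.Set.ofList (PySem.List.sorted p.2 (fun x => x) false)))

-- ===== PRECONDITION & SPEC =====
def Spec_prepare_kmers_to_positions_dict_py (kmers_dict : List (String × List String)) (sequence : String) (k : Int) (out : List (String × List Int)) : Prop := out = prepare_kmers_to_positions_dict_py_alt kmers_dict sequence k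
instance (kmers_dict : List (String × List String)) (sequence : String) (k : Int) (out : List (String × List Int)) : Decidable (Spec_prepare_kmers_to_positions_dict_py kmers_dict sequence k out) := by unfold Spec_prepare_kmers_to_positions_dict_py; infer_instance

-- ===== CLAIM (what is proved, stated in full; the proofs are below) =====
def Claim_equal_prepare_kmers_to_positions_dict_py : Prop := ∀ (kmers_dict : List (String × List String)) (sequence : String) (k : Int), Dom_prepare_kmers_to_positions_dict_py kmers_dict sequence k → Spec_prepare_kmers_to_positions_dict_py kmers_dict sequence k (prepare_kmers_to_positions_dict_py kmers_dict sequence k)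

-- ===== LEMMAS AND PROOFS =====

-- Abbreviations used only by the proofs: the matched positions pvM, the expanded
-- (key, payload) step lists pvE1/pvE2, and the intermediate dicts of each port.
theorem pv_foldl_flatMap {α β γ : Type} (l : List α) (g : α → List β) (f : γ → β → γ) (init : γ) :
    (l.flatMap g).foldl f init = l.foldl (fun a x => (g x).foldl f a) init := by
  induction l generalizing init with
  | nil => rfl
  | cons a t ih => simp [List.flatMap_cons, List.foldl_append, ih]

def pvSlc (sequence : String) (k i : Int) : String := PySem.Str.slice sequence (some i) (some (i + k))
def pvKs (d : PySem.Dict String (List String)) (s : String) : List String := s :: PySem.Dict.getD d s []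
def pvM (d : PySem.Dict String (List String)) (sequence : String) (k : Int) : List Int :=
  (PySem.List.pyRange 0 (PySem.Str.len sequence - k + 1) 1).filter (fun i => d.contains (pvSlc sequence k i))
def pvE1 (d : PySem.Dict String (List String)) (sequence : String) (k : Int) : List (String × Int) :=
  (pvM d sequence k).flatMap (fun i => (pvKs d (pvSlc sequence k i)).map (fun key => (key, i + 1)))
def pvPrep (d : PySem.Dict String (List String)) (sequence : String) (k : Int) : PySem.Dict String (List Int) :=
  (pvE1 d sequence k).foldl (fun dd q => dd.modify q.1 [] (fun v => PySem.Set.add v q.2)) PySem.Dict.empty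
def pvPairs (d : PySem.Dict String (List String)) (sequence : String) (k : Int) : List (String × Int) :=
  (pvM d sequence k).map (fun i => (pvSlc sequence k i, i + 1))
def pvOcc (d : PySem.Dict String (List String)) (sequence : String) (k : Int) : PySem.Dict String (List Int) :=
  (pvPairs d sequence k).foldl (fun dd q => dd.modify q.1 [] (fun v => v ++ [q.2])) PySem.Dict.empty
def pvE2 (d : PySem.Dict String (List String)) (sequence : String) (k : Int) : List (String × List Int) :=
  (pvOcc d sequence k).items.flatMap (fun p => (pvKs d p.1).map (fun key => (key, p.2)))
def pvAcc (d : PySem.Dict String (List String)) (sequence : String) (k : Int) : PySem.Dict String (List Int) :=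
  (pvE2 d sequence k).foldl (fun dd q => dd.modify q.1 [] (fun v => v ++ q.2)) PySem.Dict.empty

theorem pvA_loop (d : PySem.Dict String (List String)) (sequence : String) (k : Int)
    (l : List Int) (init : PySem.Dict String (List Int)) :
    List.foldl (fun prepared i =>
        if d.contains (PySem.Str.slice sequence (some i) (some (i + k))) then
          (PySem.Dict.getD d (PySem.Str.slice sequence (some i) (some (i + k))) []).foldl
            (fun prepared one => prepared.modify one [] (fun s => PySem.Set.add s (i + 1)))
            (prepared.modify (PySem.Str.slice sequence (some i) (some (i + k))) [] (fun s => PySem.Set.add s (i + 1)))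
        else prepared) init l
    = List.foldl (fun a i =>
        ((pvKs d (pvSlc sequence k i)).map (fun key => (key, i + 1))).foldl
          (fun dd q => dd.modify q.1 [] (fun v => PySem.Set.add v q.2)) a)
        init (l.filter (fun i => d.contains (pvSlc sequence k i))) := by
  induction l generalizing init with
  | nil => rfl
  | cons a t ih =>
    simp only [List.foldl_cons, List.filter_cons]
    by_cases h : d.contains (pvSlc sequence k a)
    · simp only [pvSlc] at h
      simp [h, pvSlc, ih, List.foldl_map, pvKs]
    · simp only [pvSlc] at h
      simp [h, pvSlc, ih]

theorem pvB_loop1 (d : PySem.Dict String (List String)) (sequence : String) (k : Int)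
    (l : List Int) (init : PySem.Dict String (List Int)) :
    List.foldl (fun occ i =>
        if d.contains (PySem.Str.slice sequence (some i) (some (i + k))) then
          occ.modify (PySem.Str.slice sequence (some i) (some (i + k))) [] (fun l => l ++ [i + 1])
        else occ) init l
    = List.foldl (fun dd q => dd.modify q.1 [] (fun v => v ++ [q.2])) init
        ((l.filter (fun i => d.contains (pvSlc sequence k i))).map (fun i => (pvSlc sequence k i, i + 1))) := by
  induction l generalizing init with
  | nil => rfl
  | cons a t ih =>
    simp only [List.foldl_cons, List.filter_cons]
    by_cases h : d.contains (pvSlc sequence k a)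
    · simp only [pvSlc] at h
      simp [h, pvSlc, ih]
    · simp only [pvSlc] at h
      simp [h, pvSlc, ih]

theorem pvA_eq (kmers_dict : List (String × List String)) (sequence : String) (k : Int) :
    prepare_kmers_to_positions_dict_py kmers_dict sequence k
      = (pvPrep (PySem.Dict.ofList kmers_dict) sequence k).items := by
  simp only [prepare_kmers_to_positions_dict_py, pvPrep, pvE1, pvM]
  rw [pv_foldl_flatMap, pvA_loop]

theorem pvB_eq (kmers_dict : List (String × List String)) (sequence : String) (k : Int) :
    prepare_kmers_to_positions_dict_py_alt kmers_dict sequence k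
      = (pvAcc (PySem.Dict.ofList kmers_dict) sequence k).items.map
          (fun p => (p.1, PySem.Set.ofList (PySem.List.sorted p.2 (fun x => x) false))) := by
  simp only [prepare_kmers_to_positions_dict_py_alt, pvAcc, pvE2, pvOcc, pvPairs, pvM]
  rw [pv_foldl_flatMap, pvB_loop1]
  refine congrArg (fun l => List.map _ l) (congrArg PySem.Dict.items ?_)
  apply PySem.List.foldl_congr_mem
  intro acc p _
  simp [List.foldl_map, pvKs]

theorem pv_getD_add_fold (l : List (String × Int)) (d : PySem.Dict String (List Int)) (c : String) :
    (l.foldl (fun dd q => dd.modify q.1 [] (fun v => PySem.Set.add v q.2)) d).getD c []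
      = ((l.filter (fun q => q.1 == c)).map (·.2)).foldl PySem.Set.add (d.getD c []) := by
  induction l generalizing d with
  | nil => rfl
  | cons q t ih =>
    simp only [List.foldl_cons, ih, List.filter_cons]
    by_cases h : q.1 = c
    · simp [h]
    · simp [h, PySem.Dict.getD_modify, Ne.symm h]

theorem pv_getD_app_fold (l : List (String × Int)) (d : PySem.Dict String (List Int)) (c : String) :
    (l.foldl (fun dd q => dd.modify q.1 [] (fun v => v ++ [q.2])) d).getD c []
      = d.getD c [] ++ (l.filter (fun q => q.1 == c)).map (·.2) := by
  induction l generalizing d with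
  | nil => simp
  | cons q t ih =>
    simp only [List.foldl_cons, ih, List.filter_cons]
    by_cases h : q.1 = c
    · simp [h]
    · simp [h, PySem.Dict.getD_modify, Ne.symm h]

theorem pv_getD_ext_fold (l : List (String × List Int)) (d : PySem.Dict String (List Int)) (c : String) :
    (l.foldl (fun dd q => dd.modify q.1 [] (fun v => v ++ q.2)) d).getD c []
      = d.getD c [] ++ ((l.filter (fun q => q.1 == c)).map (·.2)).flatten := by
  induction l generalizing d with
  | nil => simp
  | cons q t ih =>
    simp only [List.foldl_cons, ih, List.filter_cons]
    by_cases h : q.1 = c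
    · simp [h]
    · simp [h, PySem.Dict.getD_modify, Ne.symm h]

theorem pv_ofList_sublist {α : Type} [BEq α] [LawfulBEq α] (l : List α) :
    (PySem.Set.ofList l).Sublist l := by
  induction l with
  | nil => simp [PySem.Set.ofList]
  | cons x t ih =>
    rw [PySem.Set.ofList_cons]
    have hsub : (PySem.Set.discard (PySem.Set.ofList t) x).Sublist (PySem.Set.ofList t) := by
      simp only [PySem.Set.discard]
      exact List.filter_sublist
    exact List.Sublist.cons₂ x (hsub.trans ih)
theorem pv_ofList_eq_of_sorted (l1 l2 : List Int)
    (hm : ∀ x, x ∈ l1 ↔ x ∈ l2)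
    (h1 : l1.Pairwise (· ≤ ·)) (h2 : l2.Pairwise (· ≤ ·)) :
    PySem.Set.ofList l1 = PySem.Set.ofList l2 := by
  have n1 := PySem.Set.nodup_ofList (xs := l1)
  have n2 := PySem.Set.nodup_ofList (xs := l2)
  have p1 : (PySem.Set.ofList l1).Pairwise (· ≤ ·) := h1.sublist (pv_ofList_sublist l1)
  have p2 : (PySem.Set.ofList l2).Pairwise (· ≤ ·) := h2.sublist (pv_ofList_sublist l2)
  have hperm : (PySem.Set.ofList l1).Perm (PySem.Set.ofList l2) :=
    (List.perm_ext_iff_of_nodup n1 n2).2 (fun a => by simp [PySem.Set.mem_ofList, hm a])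
  exact List.Perm.eq_of_pairwise (fun a b _ _ hab hba => le_antisymm hab hba) p1 p2 hperm
theorem pv_update_of_subset {α : Type} [BEq α] [LawfulBEq α] (s : PySem.Set α) (ys : List α)
    (h : ∀ y ∈ ys, y ∈ s) : PySem.Set.update s ys = s := by
  rw [PySem.Set.update_eq_append_filter]
  have : (PySem.Set.ofList ys).filter (fun y => !s.contains y) = [] := by
    rw [List.filter_eq_nil_iff]
    intro y hy
    have hmem : y ∈ s := h y ((PySem.Set.mem_ofList _ _).1 hy)
    simpa using hmem
  rw [this, List.append_nil]
theorem pv_ofList_flatMap {α β : Type} [BEq α] [LawfulBEq α] [BEq β] [LawfulBEq β]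
    (l : List α) (g : α → List β) :
    PySem.Set.ofList ((PySem.Set.ofList l).flatMap g) = PySem.Set.ofList (l.flatMap g) := by
  induction l using List.reverseRecOn with
  | nil => rfl
  | append_singleton t x ih =>
    rw [PySem.Set.ofList_append_singleton]
    by_cases hx : x ∈ t
    · rw [PySem.Set.add_of_mem ((PySem.Set.mem_ofList _ _).2 hx)]
      rw [List.flatMap_append, PySem.Set.ofList_append, ih]
      refine (pv_update_of_subset _ _ ?_).symm
      intro y hy
      rw [PySem.Set.mem_ofList _ _]
      simp only [List.flatMap_singleton] at hy
      exact List.mem_flatMap.2 ⟨x, hx, hy⟩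
    · rw [PySem.Set.add_of_not_mem (by simp [PySem.Set.mem_ofList, hx])]
      rw [List.flatMap_append, List.flatMap_append, PySem.Set.ofList_append, PySem.Set.ofList_append, ih]
theorem pv_pairwise_flatMap_const {α : Type} (M : List Int) (h : M.Pairwise (· < ·))
    (g : Int → List α) :
    (M.flatMap (fun i => (g i).map (fun _ => i + 1))).Pairwise (· ≤ ·) := by
  induction M with
  | nil => simp
  | cons a t ih =>
    rcases List.pairwise_cons.1 h with ⟨ha, ht⟩
    simp only [List.flatMap_cons]
    refine List.pairwise_append.2 ⟨?_, ih ht, ?_⟩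
    · simp
    · intro x hx y hy
      rcases List.mem_map.1 hx with ⟨_, _, rfl⟩
      rcases List.mem_flatMap.1 hy with ⟨i, hi, hyi⟩
      rcases List.mem_map.1 hyi with ⟨_, _, rfl⟩
      have := ha i hi
      omega

theorem pv_getD_prep (d : PySem.Dict String (List String)) (seq : String) (k : Int) (c : String) :
    (pvPrep d seq k).getD c [] = PySem.Set.ofList (((pvE1 d seq k).filter (fun q => q.1 == c)).map (·.2)) := by
  simp only [pvPrep]
  rw [pv_getD_add_fold, PySem.Set.ofList_eq_foldl]
  simp [PySem.Dict.getD_empty]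

theorem pv_getD_occ (d : PySem.Dict String (List String)) (seq : String) (k : Int) (c : String) :
    (pvOcc d seq k).getD c [] = ((pvM d seq k).filter (fun i => pvSlc seq k i == c)).map (fun i => i + 1) := by
  simp only [pvOcc]
  rw [pv_getD_app_fold]
  simp [pvPairs, PySem.Dict.getD_empty, List.filter_map, List.map_map, Function.comp_def]

theorem pv_getD_acc (d : PySem.Dict String (List String)) (seq : String) (k : Int) (c : String) :
    (pvAcc d seq k).getD c [] = (((pvE2 d seq k).filter (fun q => q.1 == c)).map (·.2)).flatten := by
  simp only [pvAcc]
  rw [pv_getD_ext_fold]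
  simp [PySem.Dict.getD_empty]

theorem pv_keys_prep (d : PySem.Dict String (List String)) (seq : String) (k : Int) :
    (pvPrep d seq k).keys = PySem.Set.ofList ((pvE1 d seq k).map (·.1)) := by
  simp only [pvPrep]
  rw [PySem.Dict.keys_foldl_modify_key]
  simp [PySem.Set.update_nil_left, PySem.Dict.keys_empty]

theorem pv_keys_acc (d : PySem.Dict String (List String)) (seq : String) (k : Int) :
    (pvAcc d seq k).keys = PySem.Set.ofList ((pvE2 d seq k).map (·.1)) := by
  simp only [pvAcc]
  rw [PySem.Dict.keys_foldl_modify_key]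
  simp [PySem.Set.update_nil_left, PySem.Dict.keys_empty]

theorem pv_keys_occ (d : PySem.Dict String (List String)) (seq : String) (k : Int) :
    (pvOcc d seq k).keys = PySem.Set.ofList ((pvM d seq k).map (fun i => pvSlc seq k i)) := by
  simp only [pvOcc]
  rw [PySem.Dict.keys_foldl_modify_key]
  simp [PySem.Set.update_nil_left, PySem.Dict.keys_empty, pvPairs, List.map_map, Function.comp_def]

theorem pv_nodup_prep (d : PySem.Dict String (List String)) (seq : String) (k : Int) :
    (pvPrep d seq k).keys.Nodup := by
  simp only [pvPrep]
  apply PySem.Dict.nodup_keys_foldl_modify_key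
  simp [PySem.Dict.keys_empty]

theorem pv_nodup_acc (d : PySem.Dict String (List String)) (seq : String) (k : Int) :
    (pvAcc d seq k).keys.Nodup := by
  simp only [pvAcc]
  apply PySem.Dict.nodup_keys_foldl_modify_key
  simp [PySem.Dict.keys_empty]

theorem pv_nodup_occ (d : PySem.Dict String (List String)) (seq : String) (k : Int) :
    (pvOcc d seq k).keys.Nodup := by
  simp only [pvOcc]
  apply PySem.Dict.nodup_keys_foldl_modify_key
  simp [PySem.Dict.keys_empty]

theorem pv_items_occ (d : PySem.Dict String (List String)) (seq : String) (k : Int) :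
    (pvOcc d seq k).items
      = (PySem.Set.ofList ((pvM d seq k).map (fun i => pvSlc seq k i))).map
          (fun s => (s, (pvOcc d seq k).getD s [])) := by
  rw [PySem.Dict.items_eq_map_keys _ (pv_nodup_occ d seq k) [], pv_keys_occ]

theorem pv_keys_eq (d : PySem.Dict String (List String)) (seq : String) (k : Int) :
    (pvAcc d seq k).keys = (pvPrep d seq k).keys := by
  rw [pv_keys_acc, pv_keys_prep]
  have h2 : (pvE2 d seq k).map (·.1)
      = (PySem.Set.ofList ((pvM d seq k).map (fun i => pvSlc seq k i))).flatMap (fun s => pvKs d s) := by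
    simp [pvE2, List.map_flatMap, List.map_map, pv_items_occ, List.flatMap_map, Function.comp_def]
  have h1 : (pvE1 d seq k).map (·.1) = (pvM d seq k).flatMap (fun i => pvKs d (pvSlc seq k i)) := by
    simp [pvE1, List.map_flatMap, List.map_map, Function.comp_def]
  rw [h1, h2, pv_ofList_flatMap]
  congr 1
  rw [List.flatMap_map]

theorem pv_M_pairwise (d : PySem.Dict String (List String)) (seq : String) (k : Int) :
    (pvM d seq k).Pairwise (· < ·) := by
  simp only [pvM]
  exact (PySem.List.pairwise_lt_pyRange_one _ _).sublist List.filter_sublist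

theorem pv_E1c_pairwise (d : PySem.Dict String (List String)) (seq : String) (k : Int) (c : String) :
    (((pvE1 d seq k).filter (fun q => q.1 == c)).map (·.2)).Pairwise (· ≤ ·) := by
  have hall : ((pvE1 d seq k).map (·.2)).Pairwise (· ≤ ·) := by
    have h := pv_pairwise_flatMap_const (pvM d seq k) (pv_M_pairwise d seq k)
      (fun i => pvKs d (pvSlc seq k i))
    simpa [pvE1, List.map_flatMap, List.map_map, Function.comp_def] using h
  exact hall.sublist (List.filter_sublist.map _)

theorem pv_mem_iff (d : PySem.Dict String (List String)) (seq : String) (k : Int) (c : String) (x : Int) :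
    x ∈ ((pvE1 d seq k).filter (fun q => q.1 == c)).map (·.2) ↔
      x ∈ ((((pvE2 d seq k).filter (fun q => q.1 == c)).map (·.2)).flatten) := by
  simp only [List.mem_map, List.mem_filter, List.mem_flatten, List.mem_flatMap, pvE1, pvE2,
    pv_items_occ, pv_getD_occ, beq_iff_eq, PySem.Set.mem_ofList]
  constructor
  · rintro ⟨a, ⟨⟨i, hiM, key, hkey, ha⟩, hc⟩, hx⟩
    subst ha
    simp only at hc hx
    refine ⟨(List.filter (fun j => pvSlc seq k j == pvSlc seq k i) (pvM d seq k)).map (fun j => j + 1),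
      ⟨(key, (List.filter (fun j => pvSlc seq k j == pvSlc seq k i) (pvM d seq k)).map (fun j => j + 1)),
        ⟨⟨(pvSlc seq k i, (List.filter (fun j => pvSlc seq k j == pvSlc seq k i) (pvM d seq k)).map (fun j => j + 1)),
          ⟨pvSlc seq k i, ⟨i, hiM, rfl⟩, rfl⟩, key, hkey, rfl⟩, hc⟩, rfl⟩, ?_⟩
    rw [← hx]
    exact List.mem_map.mpr ⟨i, List.mem_filter.mpr ⟨hiM, by simp⟩, rfl⟩
  · rintro ⟨l, ⟨a, ⟨⟨a1, ⟨s, ⟨i0, hi0, hsi⟩, ha1⟩, key, hkey, ha⟩, hc⟩, hl⟩, hx⟩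
    subst ha1
    subst ha
    subst hsi
    simp only at hc hl hkey
    rw [← hl] at hx
    rcases List.mem_map.mp hx with ⟨i, hif, rfl⟩
    rcases List.mem_filter.mp hif with ⟨hiM, hslc⟩
    have hs : pvSlc seq k i = pvSlc seq k i0 := by simpa using hslc
    exact ⟨(key, i + 1), ⟨⟨i, hiM, key, by rw [hs]; exact hkey, rfl⟩, hc⟩, rfl⟩

theorem pv_val_eq (d : PySem.Dict String (List String)) (seq : String) (k : Int) (c : String) :
    (pvPrep d seq k).getD c []
      = PySem.Set.ofList (PySem.List.sorted ((pvAcc d seq k).getD c []) (fun x => x) false) := by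
  rw [pv_getD_prep, pv_getD_acc]
  apply pv_ofList_eq_of_sorted
  · intro x
    rw [PySem.List.mem_sorted]
    exact pv_mem_iff d seq k c x
  · exact pv_E1c_pairwise d seq k c
  · simpa using PySem.List.sorted_pairwise
      ((((pvE2 d seq k).filter (fun q => q.1 == c)).map (·.2)).flatten) (fun x => x)

theorem pv_main (d : PySem.Dict String (List String)) (seq : String) (k : Int) :
    (pvPrep d seq k).items
      = (pvAcc d seq k).items.map (fun p => (p.1, PySem.Set.ofList (PySem.List.sorted p.2 (fun x => x) false))) := by
  rw [PySem.Dict.items_eq_map_keys _ (pv_nodup_prep d seq k) [],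
      PySem.Dict.items_eq_map_keys _ (pv_nodup_acc d seq k) [],
      List.map_map, pv_keys_eq]
  refine List.map_congr_left (fun c _ => ?_)
  simp only [Function.comp_def]
  rw [pv_val_eq]

theorem pv_final (kmers_dict : List (String × List String)) (sequence : String) (k : Int) :
    prepare_kmers_to_positions_dict_py kmers_dict sequence k
      = prepare_kmers_to_positions_dict_py_alt kmers_dict sequence k := by
  rw [pvA_eq, pvB_eq]
  exact pv_main _ _ _

-- ===== VERDICT (by name: the statement is the Claim_ definition above) =====
theorem prepare_kmers_to_positions_dict_py_spec : Claim_equal_prepare_kmers_to_positions_dict_py := by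
  intro kmers_dict sequence k _
  unfold Spec_prepare_kmers_to_positions_dict_py
  exact pv_final kmers_dict sequence k
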